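-- pv_equiv track=rewrite | github.com/ysparrk/Algorithm | 프로그래머스/3/81303. 표 편집/표 편집.py | solution
-- ===== SOURCE A (Python) =====
-- def solution(n, k, cmd):
--     # 1. setting
--     table = {i: [i-1, i+1] for i in range(n)}  # linked_list
--     rlt = ['O' for _ in range(n)]
--
--     table[0] = [None, 1]
--     table[n-1] = [n-2, None]
--
--     turn_del = []  # 삭제 리스트
--
--     # 2. result
--     for c in cmd:
--         # 1) 삭제
--         if c == 'C':
--             rlt[k] = 'X'
--             prev, next = table[k]
--             turn_del.append([prev, k, next])
--
--             if next == None:  # 맨아래 -> 위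
--                 k = table[k][0]
--             else:
--                 k = table[k][1]
--
--             # 연결리스트 수정
--             if prev == None:
--                 table[next][0] = None
--             elif next == None:
--                 table[prev][1] = None
--             else:
--                 table[prev][1] = next
--                 table[next][0] = prev
--
--         # 2) 복구
--         elif c == 'Z':
--             prev, cur, next = turn_del.pop()
--             rlt[cur] = 'O'
--             # 연결리스트 복구
--             if prev == None:
--                 table[next][0] = cur
--             elif next == None:
--                 table[prev][1] = cur
--             else:
--                 table[next][0] = cur
--                 table[prev][1] = cur
--
--         # 3) 이동
--         else:
--             state, d = c.split()
--             if state == 'U':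
--                 for _ in range(int(d)):
--                     k = table[k][0]
--
--             elif state == 'D':
--                 for _ in range(int(d)):
--                     k = table[k][1]
--
--     return ''.join(rlt)
-- ===== SOURCE B (Python) =====
-- def solution(n, k, cmd):
--     # alive original indices + integer cursor into that list, undo stack of (position, row)
--     alive = list(range(n))
--     pos = k
--     result = ['O'] * n
--     stack = []
--     for c in cmd:
--         if c == 'C':
--             v = alive.pop(pos)
--             stack.append((pos, v))
--             result[v] = 'X'
--             if pos == len(alive):
--                 pos -= 1
--         elif c == 'Z':
--             p, v = stack.pop()
--             alive.insert(p, v)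
--             result[v] = 'O'
--             if p <= pos:
--                 pos += 1
--         else:
--             state, d = c.split()
--             if state == 'U':
--                 step = int(d)
--                 if step > 0:
--                     pos -= step
--             elif state == 'D':
--                 step = int(d)
--                 if step > 0:
--                     pos += step
--     return ''.join(result)
-- ===== Notes on version B (the rewrite author's own statement) =====
-- stated objective: simpler
-- what changed: Replaces the dict-based doubly linked list (pointer surgery on delete/restore, d pointer hops per move) with a plain list of alive row indices plus an integer cursor, so a move is one addition, delete is list.pop, restore is list.insert, and the undo stack stores (position, row) pairs.
-- outside the precondition, e.g. on solution(0, 0, ['U 1']): A returns '', B returns ''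
import Mathlib
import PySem

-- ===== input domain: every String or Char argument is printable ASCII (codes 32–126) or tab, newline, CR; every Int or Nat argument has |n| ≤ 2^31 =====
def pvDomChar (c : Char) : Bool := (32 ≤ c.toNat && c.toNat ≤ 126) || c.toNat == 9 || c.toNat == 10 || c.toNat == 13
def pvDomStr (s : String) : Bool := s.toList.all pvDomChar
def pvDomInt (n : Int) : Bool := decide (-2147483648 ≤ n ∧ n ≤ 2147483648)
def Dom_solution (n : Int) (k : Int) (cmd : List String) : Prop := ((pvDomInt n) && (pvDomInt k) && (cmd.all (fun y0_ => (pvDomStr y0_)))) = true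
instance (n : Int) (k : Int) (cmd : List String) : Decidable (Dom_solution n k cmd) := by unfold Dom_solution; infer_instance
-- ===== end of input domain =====

-- B replaces A's dict-encoded doubly linked list by a list of alive row indices plus an
-- integer cursor (simpler: moves are one addition, delete/restore are pop/insert).
-- Equality of the RETURN value is what is claimed; neither version mutates its arguments.

-- ===== PORT A =====

-- state of A's loop: the linked-list dict, the mask, the undo stack, the cursor (None possible)
structure PvStA where
  table : PySem.Dict Int (Option Int × Option Int)
  rlt   : List String
  turn  : List (Option Int × Int × Option Int)
  k     : Option Int

-- Python 'table[key][0] = v' / 'table[key][1] = v': key must be present (else KeyError)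
def pvSetFst (t : PySem.Dict Int (Option Int × Option Int)) (key v : Option Int) :
    PySem.Dict Int (Option Int × Option Int) :=
  match key with
  | none => t                        -- table[None]: KeyError, outside Pre_
  | some x =>
    match t.get? x with
    | some e => t.insert x (v, e.2)
    | none => t                      -- KeyError, outside Pre_
def pvSetSnd (t : PySem.Dict Int (Option Int × Option Int)) (key v : Option Int) :
    PySem.Dict Int (Option Int × Option Int) :=
  match key with
  | none => t
  | some x =>
    match t.get? x with
    | some e => t.insert x (e.1, v)
    | none => t

def pvStepA (st : PvStA) (c : String) : PvStA :=
  if c = "C" then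
    match st.k with
    | none => st                     -- rlt[None]: TypeError, outside Pre_
    | some kv =>
      match st.table.get? kv with
      | none => st                   -- KeyError, outside Pre_
      | some pn =>
        let prev := pn.1
        let next := pn.2
        let rlt := PySem.List.pySetD st.rlt kv "X"
        let turn := st.turn ++ [(prev, kv, next)]
        let k' := if next = none then prev else next
        let table :=
          if prev = none then pvSetFst st.table next none
          else if next = none then pvSetSnd st.table prev none
          else pvSetFst (pvSetSnd st.table prev next) next prev
        { table := table, rlt := rlt, turn := turn, k := k' }
  else if c = "Z" then
    match PySem.List.pop? st.turn (-1) with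
    | none => st                     -- pop from empty list: IndexError, outside Pre_
    | some (entry, turn') =>
      let prev := entry.1
      let cur := entry.2.1
      let next := entry.2.2
      let rlt := PySem.List.pySetD st.rlt cur "O"
      let table :=
        if prev = none then pvSetFst st.table next (some cur)
        else if next = none then pvSetSnd st.table prev (some cur)
        else pvSetSnd (pvSetFst st.table next (some cur)) prev (some cur)
      { table := table, rlt := rlt, turn := turn', k := st.k }
  else
    match PySem.Str.split₀ c with
    | [s, ds] =>
      if s = "U" then
        match PySem.Int.ofStr? ds with
        | some d =>
          { st with k := ((PySem.List.pyRange 0 d 1).foldl (fun kk _ => kk.bind (fun x => (st.table.get? x).bind (·.1))) st.k) }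
        | none => st                 -- int(d): ValueError, outside Pre_
      else if s = "D" then
        match PySem.Int.ofStr? ds with
        | some d =>
          { st with k := ((PySem.List.pyRange 0 d 1).foldl (fun kk _ => kk.bind (fun x => (st.table.get? x).bind (·.2))) st.k) }
        | none => st
      else st                        -- unknown two-token command: A does nothing
    | _ => st                        -- unpacking 'state, d = c.split()' fails: outside Pre_

def solution (n : Int) (k : Int) (cmd : List String) : String :=
  let table0 := (PySem.List.pyRange 0 n 1).foldl
      (fun t i => t.insert i (some (i - 1), some (i + 1))) PySem.Dict.empty
  let table1 := (table0.insert 0 (none, some 1)).insert (n - 1) (some (n - 2), none)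
  let rlt0 := (PySem.List.pyRange 0 n 1).map (fun _ => "O")
  let fin := cmd.foldl pvStepA { table := table1, rlt := rlt0, turn := [], k := some k }
  PySem.Str.join "" fin.rlt

-- ===== PORT B =====

-- state of B's loop: alive original indices, cursor position in it, mask, undo stack
structure PvStB where
  alive  : List Int
  pos    : Int
  result : List String
  stack  : List (Int × Int)

def pvStepB (st : PvStB) (c : String) : PvStB :=
  if c = "C" then
    match PySem.List.pop? st.alive st.pos with
    | none => st                     -- alive.pop(pos): IndexError, outside Pre_
    | some (v, alive') =>
      let stack := st.stack ++ [(st.pos, v)]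
      let result := PySem.List.pySetD st.result v "X"
      let pos := if st.pos = PySem.List.len alive' then st.pos - 1 else st.pos
      { alive := alive', pos := pos, result := result, stack := stack }
  else if c = "Z" then
    match PySem.List.pop? st.stack (-1) with
    | none => st                     -- pop from empty stack: IndexError, outside Pre_
    | some (pv, stack') =>
      let alive := PySem.List.insert st.alive pv.1 pv.2
      let result := PySem.List.pySetD st.result pv.2 "O"
      let pos := if pv.1 ≤ st.pos then st.pos + 1 else st.pos
      { alive := alive, pos := pos, result := result, stack := stack' }
  else
    match PySem.Str.split₀ c with
    | [s, ds] =>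
      if s = "U" then
        match PySem.Int.ofStr? ds with
        | some d => if 0 < d then { st with pos := st.pos - d } else st
        | none => st
      else if s = "D" then
        match PySem.Int.ofStr? ds with
        | some d => if 0 < d then { st with pos := st.pos + d } else st
        | none => st
      else st
    | _ => st

def solution_alt (n : Int) (k : Int) (cmd : List String) : String :=
  let fin := cmd.foldl pvStepB
    { alive := PySem.List.pyRange 0 n 1, pos := k,
      result := List.replicate n.toNat "O", stack := [] }
  PySem.Str.join "" fin.result

-- ===== PRECONDITION & SPEC =====

-- commands that neither touch the table nor dereference the cursor: unknown two-token
-- commands (A ignores them) and moves with a non-positive distance (no-ops for both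
-- programs); a script of only these returns the all-'O' mask for ANY n and k
def pvNoopChk (c : String) : Bool :=
  if c = "C" then false
  else if c = "Z" then false
  else
    match PySem.Str.split₀ c with
    | [s', ds] =>
      if s' = "U" ∨ s' = "D" then
        match PySem.Int.ofStr? ds with
        | some d => decide (d ≤ 0)
        | none => false
      else true
    | _ => false

-- Validity of an editing script is inherently sequential, so the precondition walks the
-- commands once, tracking only the alive COUNT, the cursor POSITION and the stack of
-- recorded restore positions (never the table or the mask, which the ports compute).
-- The cursor may be stranded one step off the table (position -1 or aliveCount), which is
-- where A's cursor is None; dereferencing it again (a further positive move, or a delete)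
-- is what raises in A. Checker state: some (aliveCount, cursorPos, restorePositions);
-- none once A would have raised.
def pvChk (s : Option (Int × Int × List Int)) (c : String) : Option (Int × Int × List Int) :=
  match s with
  | none => none
  | some (a, p, st) =>
    if c = "C" then
      if 2 ≤ a ∧ 0 ≤ p ∧ p < a then
        some (a - 1, if p = a - 1 then p - 1 else p, p :: st)
      else none
    else if c = "Z" then
      match st with
      | [] => none
      | q :: st' => some (a + 1, if q ≤ p then p + 1 else p, st')
    else
      match PySem.Str.split₀ c with
      | [s', ds] =>
        if s' = "U" then
          match PySem.Int.ofStr? ds with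
          | some d =>
            if d ≤ 0 then some (a, p, st)
            else if 0 ≤ p ∧ p < a ∧ -1 ≤ p - d then some (a, p - d, st) else none
          | none => none
        else if s' = "D" then
          match PySem.Int.ofStr? ds with
          | some d =>
            if d ≤ 0 then some (a, p, st)
            else if 0 ≤ p ∧ p < a ∧ p + d ≤ a then some (a, p + d, st) else none
          | none => none
        else some (a, p, st)
      | _ => none

-- Pre_ excludes the scripts on which A raises (malformed commands, undo with empty
-- history, delete with at most one row alive or a dead cursor, a positive move that
-- dereferences a cursor already off the table); beyond that it only narrows one
-- degenerate corner: for n ≤ 0 or a cursor outside the table just all-no-op scripts are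
-- admitted, although A survives a few one-step moves there through its two phantom dict
-- keys (B returns the same empty/all-'O' string on those excluded inputs).
def Pre_solution (n : Int) (k : Int) (cmd : List String) : Prop :=
  (cmd.all pvNoopChk = true) ∨
  (1 ≤ n ∧ 0 ≤ k ∧ k < n ∧ (cmd.foldl pvChk (some (n, k, []))).isSome = true)
instance (n : Int) (k : Int) (cmd : List String) : Decidable (Pre_solution n k cmd) := by
  unfold Pre_solution; infer_instance

def pvWitness_solution : Int × Int × List String := (4, 2, ["C", "U 1", "C", "Z", "U 2", "Z"])

def Spec_solution (n : Int) (k : Int) (cmd : List String) (out : String) : Prop := out = solution_alt n k cmd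
instance (n : Int) (k : Int) (cmd : List String) (out : String) : Decidable (Spec_solution n k cmd out) := by unfold Spec_solution; infer_instance

-- ===== CLAIM (what is proved, stated in full; the proofs are below) =====
def Claim_equal_solution : Prop := ∀ (n : Int) (k : Int) (cmd : List String), Dom_solution n k cmd → Pre_solution n k cmd → Spec_solution n k cmd (solution n k cmd)


-- ===== LEMMAS AND PROOFS =====

-- Python-style indexing into the alive list: some row for 0 <= i < len, none outside
def pvOptNth (L : List Int) (i : Int) : Option Int := if 0 ≤ i then L[i.toNat]? else none

-- the linked-list dict encodes exactly the neighbour structure of the alive list L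
def pvChain (t : PySem.Dict Int (Option Int × Option Int)) (L : List Int) : Prop :=
  ∀ (i : Int) (x : Int), pvOptNth L i = some x →
    t.get? x = some (pvOptNth L (i - 1), pvOptNth L (i + 1))

-- the two undo stacks (top first) agree and restore consistently, level by level
def pvStackOK (t : PySem.Dict Int (Option Int × Option Int)) :
    List Int → List (Option Int × Int × Option Int) → List (Int × Int) → Prop
  | _, [], [] => True
  | L, e :: ta, q :: sb =>
      e.2.1 = q.2 ∧ e.2.1 ∉ L ∧ 0 ≤ q.1 ∧ q.1 ≤ (L.length : Int) ∧
      e.1 = pvOptNth L (q.1 - 1) ∧ e.2.2 = pvOptNth L q.1 ∧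
      t.get? e.2.1 = some (e.1, e.2.2) ∧
      pvStackOK t (PySem.List.insert L q.1 e.2.1) ta sb
  | _, _, _ => False

-- the simulation relation between A's and B's loop states; the cursor may sit one step
-- off either end of the alive list (pvOptNth there is none = A's cursor None)
def pvRel (sa : PvStA) (sb : PvStB) : Prop :=
  sa.rlt = sb.result ∧ sb.alive.Nodup ∧ -1 ≤ sb.pos ∧ sb.pos ≤ (sb.alive.length : Int) ∧
  sa.k = pvOptNth sb.alive sb.pos ∧ pvChain sa.table sb.alive ∧
  pvStackOK sa.table sb.alive sa.turn.reverse sb.stack.reverse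

lemma pvOptNth_of_nonneg {L : List Int} {i : Int} (hi : 0 ≤ i) :
    pvOptNth L i = L[i.toNat]? := by
  simp [pvOptNth, hi]

lemma pvOptNth_neg {L : List Int} {i : Int} (h : i < 0) : pvOptNth L i = none := by
  simp [pvOptNth, not_le.mpr h]

lemma pvOptNth_ge {L : List Int} {i : Int} (h : (L.length : Int) ≤ i) : pvOptNth L i = none := by
  rw [pvOptNth_of_nonneg (by omega)]
  exact List.getElem?_eq_none (by omega)

lemma pvOptNth_natCast (L : List Int) (j : Nat) : pvOptNth L (j : Int) = L[j]? := by
  rw [pvOptNth_of_nonneg (by omega)]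
  simp

lemma pvOptNth_some {L : List Int} {i : Int} (h0 : 0 ≤ i) (h1 : i < (L.length : Int)) :
    pvOptNth L i = some (L[i.toNat]'(by omega)) := by
  rw [pvOptNth_of_nonneg h0]
  exact List.getElem?_eq_getElem (by omega : i.toNat < L.length)

lemma pvOptNth_isSome {L : List Int} {i : Int} {x : Int} (h : pvOptNth L i = some x) :
    0 ≤ i ∧ i < (L.length : Int) := by
  constructor
  · by_contra hc; rw [pvOptNth_neg (by omega)] at h; cases h
  · by_contra hc; rw [pvOptNth_ge (by omega)] at h; cases h

lemma pvOptNth_mem {L : List Int} {i : Int} {x : Int} (h : pvOptNth L i = some x) : x ∈ L := by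
  obtain ⟨h0, h1⟩ := pvOptNth_isSome h
  rw [pvOptNth_some h0 h1] at h
  exact (Option.some_inj.mp h) ▸ List.getElem_mem _

lemma pvOptNth_inj {L : List Int} (hnd : L.Nodup) {i j : Int} {x : Int}
    (hi : pvOptNth L i = some x) (hj : pvOptNth L j = some x) : i = j := by
  obtain ⟨hi0, hi1⟩ := pvOptNth_isSome hi
  obtain ⟨hj0, hj1⟩ := pvOptNth_isSome hj
  rw [pvOptNth_some hi0 hi1] at hi
  rw [pvOptNth_some hj0 hj1] at hj
  have : i.toNat = j.toNat := by
    apply (List.Nodup.getElem_inj_iff hnd).mp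
    rw [Option.some_inj.mp hi, Option.some_inj.mp hj]
  omega

lemma pvInsertIdx_take_drop {α : Type} : ∀ (l : List α) (n : Nat) (a : α), n ≤ l.length →
    l.insertIdx n a = l.take n ++ a :: l.drop n := by
  intro l n
  induction l generalizing n with
  | nil =>
    intro a h
    have : n = 0 := by simpa using h
    subst this; simp
  | cons y ys ih =>
    intro a h
    cases n with
    | zero => simp
    | succ m => simp [List.insertIdx_succ_cons, ih m a (by simpa using h)]

lemma pvInsert_eq_insertIdx (L : List Int) (p : Int) (v : Int) (h0 : 0 ≤ p)
    (h1 : p ≤ (L.length : Int)) : PySem.List.insert L p v = L.insertIdx p.toNat v := by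
  have h2 := PySem.List.insert_natCast L p.toNat v (by omega)
  rw [show ((p.toNat : Nat) : Int) = p by omega] at h2
  rw [h2, pvInsertIdx_take_drop L p.toNat v (by omega)]

lemma pvInsert_optNth (L : List Int) (p v : Int) (h0 : 0 ≤ p) (h1 : p ≤ (L.length : Int))
    (i : Int) (hi : 0 ≤ i) :
    pvOptNth (PySem.List.insert L p v) i =
      if i < p then pvOptNth L i else if i = p then some v else pvOptNth L (i - 1) := by
  rw [pvInsert_eq_insertIdx L p v h0 h1]
  rcases lt_trichotomy i p with hlt | heq | hgt
  · rw [if_pos hlt, pvOptNth_of_nonneg hi, pvOptNth_of_nonneg hi, List.getElem?_insertIdx,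
      if_pos (by omega)]
  · subst heq
    rw [if_neg (lt_irrefl i), if_pos rfl, pvOptNth_of_nonneg hi, List.getElem?_insertIdx,
      if_neg (by omega), if_pos rfl, if_pos (by omega)]
  · rw [if_neg (by omega), if_neg (by omega), pvOptNth_of_nonneg hi,
      pvOptNth_of_nonneg (by omega : (0:Int) ≤ i - 1), List.getElem?_insertIdx,
      if_neg (by omega), if_neg (by omega)]
    congr 1; omega

lemma pvErase_optNth (L : List Int) (p : Nat) (i : Int) (hi : 0 ≤ i) :
    pvOptNth (L.eraseIdx p) i = if i < (p : Int) then pvOptNth L i else pvOptNth L (i + 1) := by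
  rw [pvOptNth_of_nonneg hi, List.getElem?_eraseIdx]
  split
  · next hlt => rw [if_pos (by omega), pvOptNth_of_nonneg hi]
  · next hge =>
    rw [if_neg (by omega), pvOptNth_of_nonneg (by omega : (0:Int) ≤ i + 1)]
    congr 1; omega

lemma pvInsert_mem (L : List Int) (p v : Int) (h0 : 0 ≤ p) (h1 : p ≤ (L.length : Int))
    (x : Int) : x ∈ PySem.List.insert L p v ↔ x = v ∨ x ∈ L := by
  rw [pvInsert_eq_insertIdx L p v h0 h1]
  exact List.mem_insertIdx (by omega)

lemma pvInsert_nodup (L : List Int) (p v : Int) (h0 : 0 ≤ p) (h1 : p ≤ (L.length : Int))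
    (hnd : L.Nodup) (hv : v ∉ L) : (PySem.List.insert L p v).Nodup := by
  rw [pvInsert_eq_insertIdx L p v h0 h1, pvInsertIdx_take_drop L p.toNat v (by omega)]
  have hperm : (L.take p.toNat ++ v :: L.drop p.toNat).Perm (v :: L) := by
    have h := List.perm_middle (a := v) (l₁ := L.take p.toNat) (l₂ := L.drop p.toNat)
    rwa [List.take_append_drop] at h
  exact hperm.nodup_iff.mpr (List.nodup_cons.mpr ⟨hv, hnd⟩)

lemma pvInsert_length (L : List Int) (p v : Int) (h0 : 0 ≤ p) (h1 : p ≤ (L.length : Int)) :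
    (PySem.List.insert L p v).length = L.length + 1 := by
  rw [pvInsert_eq_insertIdx L p v h0 h1, pvInsertIdx_take_drop L p.toNat v (by omega)]
  simp only [List.length_append, List.length_take, List.length_cons, List.length_drop]
  omega

lemma pvErase_cancel (L : List Int) (p : Nat) (hp : p < L.length) :
    PySem.List.insert (L.eraseIdx p) ((p : Nat) : Int) (L[p]'hp) = L := by
  rw [pvInsert_eq_insertIdx _ _ _ (by omega) (by rw [List.length_eraseIdx_of_lt hp]; omega)]
  simp only [Int.toNat_natCast]
  exact List.insertIdx_eraseIdx_getElem hp

lemma pvSetFst_get?_none (t : PySem.Dict Int (Option Int × Option Int)) (v : Option Int)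
    (x : Int) : (pvSetFst t none v).get? x = t.get? x := rfl

lemma pvSetSnd_get?_none (t : PySem.Dict Int (Option Int × Option Int)) (v : Option Int)
    (x : Int) : (pvSetSnd t none v).get? x = t.get? x := rfl

lemma pvSetFst_get?_ne (t : PySem.Dict Int (Option Int × Option Int)) (y : Int)
    (v : Option Int) (x : Int) (h : x ≠ y) : (pvSetFst t (some y) v).get? x = t.get? x := by
  simp only [pvSetFst]
  cases ht : t.get? y with
  | none => rfl
  | some e => exact PySem.Dict.get?_insert_of_ne t _ h

lemma pvSetSnd_get?_ne (t : PySem.Dict Int (Option Int × Option Int)) (y : Int)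
    (v : Option Int) (x : Int) (h : x ≠ y) : (pvSetSnd t (some y) v).get? x = t.get? x := by
  simp only [pvSetSnd]
  cases ht : t.get? y with
  | none => rfl
  | some e => exact PySem.Dict.get?_insert_of_ne t _ h

lemma pvSetFst_get?_self (t : PySem.Dict Int (Option Int × Option Int)) (y : Int)
    (v : Option Int) (e : Option Int × Option Int) (h : t.get? y = some e) :
    (pvSetFst t (some y) v).get? y = some (v, e.2) := by
  simp only [pvSetFst]
  rw [h]
  exact PySem.Dict.get?_insert_self t y (v, e.2)

lemma pvSetSnd_get?_self (t : PySem.Dict Int (Option Int × Option Int)) (y : Int)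
    (v : Option Int) (e : Option Int × Option Int) (h : t.get? y = some e) :
    (pvSetSnd t (some y) v).get? y = some (e.1, v) := by
  simp only [pvSetSnd]
  rw [h]
  exact PySem.Dict.get?_insert_self t y (e.1, v)

lemma pvFoldlConst {α γ : Type} (l : List γ) (f : α → α) (x : α) :
    l.foldl (fun a _ => f a) x = f^[l.length] x := by
  induction l generalizing x with
  | nil => rfl
  | cons y ys ih => simp [List.foldl_cons, ih, Function.iterate_succ_apply]

lemma pvWalkStep (t : PySem.Dict Int (Option Int × Option Int)) (L : List Int)
    (hch : pvChain t L) (i : Int) (x : Int) (h : pvOptNth L i = some x) :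
    (t.get? x).bind (·.1) = pvOptNth L (i - 1) ∧ (t.get? x).bind (·.2) = pvOptNth L (i + 1) := by
  rw [hch i x h]
  exact ⟨rfl, rfl⟩

lemma pvWalkUp (t : PySem.Dict Int (Option Int × Option Int)) (L : List Int)
    (hch : pvChain t L) : ∀ (d : Nat) (i : Int), -1 ≤ i - d → i < (L.length : Int) →
    (fun kk : Option Int => kk.bind (fun x => (t.get? x).bind (·.1)))^[d] (pvOptNth L i) =
      pvOptNth L (i - d) := by
  intro d
  induction d with
  | zero => intro i h0 h1; simp
  | succ m ih =>
    intro i h0 h1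
    rw [Function.iterate_succ_apply]
    have hx := pvOptNth_some (L := L) (by push_cast at h0 ⊢; omega : (0:Int) ≤ i) h1
    have hstep := (pvWalkStep t L hch i _ hx).1
    have : (pvOptNth L i).bind (fun x => (t.get? x).bind (·.1)) = pvOptNth L (i - 1) := by
      rw [hx]; simpa using hstep
    rw [this]
    have := ih (i - 1) (by push_cast at h0 ⊢; omega) (by omega)
    rw [this]; congr 1; push_cast; omega

lemma pvWalkDown (t : PySem.Dict Int (Option Int × Option Int)) (L : List Int)
    (hch : pvChain t L) : ∀ (d : Nat) (i : Int), 0 ≤ i → i + d ≤ (L.length : Int) →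
    (fun kk : Option Int => kk.bind (fun x => (t.get? x).bind (·.2)))^[d] (pvOptNth L i) =
      pvOptNth L (i + d) := by
  intro d
  induction d with
  | zero => intro i h0 h1; simp
  | succ m ih =>
    intro i h0 h1
    rw [Function.iterate_succ_apply]
    have hx := pvOptNth_some (L := L) h0 (by push_cast at h1 ⊢; omega)
    have hstep := (pvWalkStep t L hch i _ hx).2
    have : (pvOptNth L i).bind (fun x => (t.get? x).bind (·.2)) = pvOptNth L (i + 1) := by
      rw [hx]; simpa using hstep
    rw [this]
    have := ih (i + 1) (by omega) (by push_cast at h1 ⊢; omega)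
    rw [this]; congr 1; push_cast; omega

-- table update performed by A when deleting the row at position p of the alive list L
def pvDelTbl (t : PySem.Dict Int (Option Int × Option Int)) (L : List Int) (p : Int) :
    PySem.Dict Int (Option Int × Option Int) :=
  if pvOptNth L (p - 1) = none then pvSetFst t (pvOptNth L (p + 1)) none
  else if pvOptNth L (p + 1) = none then pvSetSnd t (pvOptNth L (p - 1)) none
  else pvSetFst (pvSetSnd t (pvOptNth L (p - 1)) (pvOptNth L (p + 1))) (pvOptNth L (p + 1))
    (pvOptNth L (p - 1))

-- table update performed by A when restoring row cv at position q of the alive list L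
def pvInsTbl (t : PySem.Dict Int (Option Int × Option Int)) (L : List Int) (q : Int)
    (cv : Int) : PySem.Dict Int (Option Int × Option Int) :=
  if pvOptNth L (q - 1) = none then pvSetFst t (pvOptNth L q) (some cv)
  else if pvOptNth L q = none then pvSetSnd t (pvOptNth L (q - 1)) (some cv)
  else pvSetSnd (pvSetFst t (pvOptNth L q) (some cv)) (pvOptNth L (q - 1)) (some cv)

lemma pvDelTbl_get?_other (t : PySem.Dict Int (Option Int × Option Int)) (L : List Int)
    (p : Int) (x : Int) (hp : pvOptNth L (p - 1) ≠ some x) (hn : pvOptNth L (p + 1) ≠ some x) :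
    (pvDelTbl t L p).get? x = t.get? x := by
  unfold pvDelTbl
  split
  · next h1 =>
    cases h2 : pvOptNth L (p + 1) with
    | none => rw [pvSetFst_get?_none]
    | some z => exact pvSetFst_get?_ne _ _ _ _ (by rintro rfl; exact hn h2)
  · next h1 =>
    split
    · next h2 =>
      cases h3 : pvOptNth L (p - 1) with
      | none => rw [pvSetSnd_get?_none]
      | some y => exact pvSetSnd_get?_ne _ _ _ _ (by rintro rfl; exact hp h3)
    · next h2 =>
      cases h3 : pvOptNth L (p + 1) with
      | none => exact absurd h3 h2
      | some z =>
        cases h4 : pvOptNth L (p - 1) with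
        | none => exact absurd h4 h1
        | some y =>
          rw [pvSetFst_get?_ne _ _ _ _ (by rintro rfl; exact hn h3),
            pvSetSnd_get?_ne _ _ _ _ (by rintro rfl; exact hp h4)]

lemma pvInsTbl_get?_other (t : PySem.Dict Int (Option Int × Option Int)) (L : List Int)
    (q cv : Int) (x : Int) (hp : pvOptNth L (q - 1) ≠ some x) (hn : pvOptNth L q ≠ some x) :
    (pvInsTbl t L q cv).get? x = t.get? x := by
  unfold pvInsTbl
  split
  · next h1 =>
    cases h2 : pvOptNth L q with
    | none => rw [pvSetFst_get?_none]
    | some z => exact pvSetFst_get?_ne _ _ _ _ (by rintro rfl; exact hn h2)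
  · next h1 =>
    split
    · next h2 =>
      cases h3 : pvOptNth L (q - 1) with
      | none => exact absurd h3 h1
      | some y => exact pvSetSnd_get?_ne _ _ _ _ (by rintro rfl; exact hp h3)
    · next h2 =>
      cases h3 : pvOptNth L q with
      | none => exact absurd h3 h2
      | some z =>
        cases h4 : pvOptNth L (q - 1) with
        | none => exact absurd h4 h1
        | some y =>
          rw [pvSetSnd_get?_ne _ _ _ _ (by rintro rfl; exact hp h4),
            pvSetFst_get?_ne _ _ _ _ (by rintro rfl; exact hn h3)]

lemma pvDelTbl_get?_prev (t : PySem.Dict Int (Option Int × Option Int)) (L : List Int)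
    (p : Int) (hnd : L.Nodup) (hch : pvChain t L) {y : Int}
    (hy : pvOptNth L (p - 1) = some y) :
    (pvDelTbl t L p).get? y = some (pvOptNth L (p - 2), pvOptNth L (p + 1)) := by
  have he := hch (p - 1) y hy
  rw [show p - 1 - 1 = p - 2 by ring, show p - 1 + 1 = p by ring] at he
  unfold pvDelTbl
  rw [if_neg (by rw [hy]; simp), hy]
  cases h2 : pvOptNth L (p + 1) with
  | none =>
    rw [if_pos rfl, pvSetSnd_get?_self t y none _ he]
  | some z =>
    have hyz : y ≠ z := by
      rintro rfl
      have := pvOptNth_inj hnd hy h2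
      omega
    rw [if_neg (by simp), pvSetFst_get?_ne _ _ _ _ hyz,
      pvSetSnd_get?_self t y (some z) _ he]

lemma pvDelTbl_get?_next (t : PySem.Dict Int (Option Int × Option Int)) (L : List Int)
    (p : Int) (hnd : L.Nodup) (hch : pvChain t L) {z : Int}
    (hz : pvOptNth L (p + 1) = some z) :
    (pvDelTbl t L p).get? z = some (pvOptNth L (p - 1), pvOptNth L (p + 2)) := by
  have he := hch (p + 1) z hz
  rw [show p + 1 - 1 = p by ring, show p + 1 + 1 = p + 2 by ring] at he
  unfold pvDelTbl
  rw [hz]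
  cases h1 : pvOptNth L (p - 1) with
  | none =>
    rw [if_pos rfl, pvSetFst_get?_self t z none _ he]
  | some y =>
    have hzy : z ≠ y := by
      rintro rfl
      have := pvOptNth_inj hnd hz h1
      omega
    rw [if_neg (by simp), if_neg (by simp)]
    have ht2 : (pvSetSnd t (some y) (some z)).get? z = some (pvOptNth L p, pvOptNth L (p + 2)) := by
      rw [pvSetSnd_get?_ne _ _ _ _ hzy]; exact he
    rw [pvSetFst_get?_self _ z (some y) _ ht2]

lemma pvInsTbl_get?_prev (t : PySem.Dict Int (Option Int × Option Int)) (L : List Int)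
    (q cv : Int) (hnd : L.Nodup) (hch : pvChain t L) {y : Int}
    (hy : pvOptNth L (q - 1) = some y) :
    (pvInsTbl t L q cv).get? y = some (pvOptNth L (q - 2), some cv) := by
  have he := hch (q - 1) y hy
  rw [show q - 1 - 1 = q - 2 by ring, show q - 1 + 1 = q by ring] at he
  unfold pvInsTbl
  rw [if_neg (by rw [hy]; simp), hy]
  cases h2 : pvOptNth L q with
  | none =>
    rw [if_pos rfl, pvSetSnd_get?_self t y (some cv) _ he]
  | some z =>
    have hyz : y ≠ z := by
      rintro rfl
      have := pvOptNth_inj hnd hy h2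
      omega
    rw [if_neg (by simp)]
    rw [h2] at he
    have ht2 : (pvSetFst t (some z) (some cv)).get? y = some (pvOptNth L (q - 2), some z) := by
      rw [pvSetFst_get?_ne _ _ _ _ hyz]; exact he
    rw [pvSetSnd_get?_self _ y (some cv) _ ht2]

lemma pvInsTbl_get?_next (t : PySem.Dict Int (Option Int × Option Int)) (L : List Int)
    (q cv : Int) (hnd : L.Nodup) (hch : pvChain t L) {z : Int}
    (hz : pvOptNth L q = some z) :
    (pvInsTbl t L q cv).get? z = some (some cv, pvOptNth L (q + 1)) := by
  have he := hch q z hz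
  unfold pvInsTbl
  rw [hz]
  cases h1 : pvOptNth L (q - 1) with
  | none =>
    rw [if_pos rfl, pvSetFst_get?_self t z (some cv) _ he]
  | some y =>
    have hzy : z ≠ y := by
      rintro rfl
      have := pvOptNth_inj hnd hz h1
      omega
    rw [if_neg (by simp), if_neg (by simp), pvSetSnd_get?_ne _ _ _ _ hzy,
      pvSetFst_get?_self t z (some cv) _ he]

lemma pvErase_optNth_all (L : List Int) (p : Int) (hp0 : 0 ≤ p) (j : Int) :
    pvOptNth (L.eraseIdx p.toNat) j = if j < p then pvOptNth L j else pvOptNth L (j + 1) := by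
  by_cases hj : 0 ≤ j
  · rw [pvErase_optNth L p.toNat j hj, show ((p.toNat : Nat) : Int) = p by omega]
  · rw [pvOptNth_neg (by omega), if_pos (by omega), pvOptNth_neg (by omega)]

lemma pvInsert_optNth_all (L : List Int) (q cv : Int) (hq0 : 0 ≤ q) (hq1 : q ≤ (L.length : Int))
    (j : Int) : pvOptNth (PySem.List.insert L q cv) j =
      if j < q then pvOptNth L j else if j = q then some cv else pvOptNth L (j - 1) := by
  by_cases hj : 0 ≤ j
  · rw [pvInsert_optNth L q cv hq0 hq1 j hj]
  · rw [pvOptNth_neg (by omega), if_pos (by omega), pvOptNth_neg (by omega)]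

lemma pvChainDel (t : PySem.Dict Int (Option Int × Option Int)) (L : List Int) (p : Int)
    (hnd : L.Nodup) (hch : pvChain t L) (hp0 : 0 ≤ p) (hp1 : p < (L.length : Int)) :
    pvChain (pvDelTbl t L p) (L.eraseIdx p.toNat) := by
  have hE : ∀ j : Int, pvOptNth (L.eraseIdx p.toNat) j =
      if j < p then pvOptNth L j else pvOptNth L (j + 1) := pvErase_optNth_all L p hp0
  intro i x hx
  rw [hE i] at hx
  rw [hE (i - 1), hE (i + 1)]
  by_cases h1 : i < p
  · rw [if_pos h1] at hx
    by_cases h2 : i = p - 1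
    · subst h2
      rw [pvDelTbl_get?_prev t L p hnd hch hx, if_pos (by omega), if_neg (by omega)]
      ring_nf
    · have hxp : pvOptNth L (p - 1) ≠ some x := by
        intro hc; exact h2 (pvOptNth_inj hnd hx hc)
      have hxn : pvOptNth L (p + 1) ≠ some x := by
        intro hc; have := pvOptNth_inj hnd hx hc; omega
      rw [pvDelTbl_get?_other t L p x hxp hxn, hch i x hx, if_pos (by omega),
        if_pos (by omega)]
  · rw [if_neg h1] at hx
    by_cases h2 : i = p
    · subst h2
      rw [pvDelTbl_get?_next t L i hnd hch hx, if_pos (by omega), if_neg (by omega)]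
      ring_nf
    · have hxp : pvOptNth L (p - 1) ≠ some x := by
        intro hc; have := pvOptNth_inj hnd hx hc; omega
      have hxn : pvOptNth L (p + 1) ≠ some x := by
        intro hc; have := pvOptNth_inj hnd hx hc; omega
      rw [pvDelTbl_get?_other t L p x hxp hxn, hch (i + 1) x hx, if_neg (by omega),
        if_neg (by omega)]
      ring_nf

lemma pvChainIns (t : PySem.Dict Int (Option Int × Option Int)) (L : List Int) (q cv : Int)
    (hnd : L.Nodup) (hch : pvChain t L) (hq0 : 0 ≤ q) (hq1 : q ≤ (L.length : Int))
    (hcv : cv ∉ L) (hct : t.get? cv = some (pvOptNth L (q - 1), pvOptNth L q)) :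
    pvChain (pvInsTbl t L q cv) (PySem.List.insert L q cv) := by
  have hI : ∀ j : Int, pvOptNth (PySem.List.insert L q cv) j =
      if j < q then pvOptNth L j else if j = q then some cv else pvOptNth L (j - 1) :=
    pvInsert_optNth_all L q cv hq0 hq1
  have hnotmem : ∀ j : Int, pvOptNth L j ≠ some cv := by
    intro j hc; exact hcv (pvOptNth_mem hc)
  intro i x hx
  rw [hI i] at hx
  rw [hI (i - 1), hI (i + 1)]
  by_cases h1 : i < q
  · rw [if_pos h1] at hx
    by_cases h2 : i = q - 1
    · subst h2
      rw [pvInsTbl_get?_prev t L q cv hnd hch hx, if_pos (by omega), if_neg (by omega),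
        if_pos (by omega)]
      ring_nf
    · have hxp : pvOptNth L (q - 1) ≠ some x := by
        intro hc; exact h2 (pvOptNth_inj hnd hx hc)
      have hxn : pvOptNth L q ≠ some x := by
        intro hc; have := pvOptNth_inj hnd hx hc; omega
      rw [pvInsTbl_get?_other t L q cv x hxp hxn, hch i x hx, if_pos (by omega),
        if_pos (by omega)]
  · rw [if_neg h1] at hx
    by_cases h2 : i = q
    · rw [if_pos h2] at hx
      obtain rfl : cv = x := Option.some_inj.mp hx
      rw [h2]
      rw [pvInsTbl_get?_other t L q cv cv (hnotmem _) (hnotmem _), hct,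
        if_pos (by omega), if_neg (by omega), if_neg (by omega)]
      ring_nf
    · rw [if_neg h2] at hx
      by_cases h3 : i = q + 1
      · subst h3
        rw [show q + 1 - 1 = q by ring] at hx
        rw [pvInsTbl_get?_next t L q cv hnd hch hx, if_neg (by omega), if_pos (by omega),
          if_neg (by omega), if_neg (by omega)]
        ring_nf
      · have hxp : pvOptNth L (q - 1) ≠ some x := by
          intro hc; have := pvOptNth_inj hnd hx hc; omega
        have hxn : pvOptNth L q ≠ some x := by
          intro hc; have := pvOptNth_inj hnd hx hc; omega
        rw [pvInsTbl_get?_other t L q cv x hxp hxn, hch (i - 1) x hx, if_neg (by omega),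
          if_neg (by omega), if_neg (by omega), if_neg (by omega)]
        ring_nf

lemma pvStackOK_congr : ∀ (ta : List (Option Int × Int × Option Int)) (sb : List (Int × Int))
    (L : List Int) (t t' : PySem.Dict Int (Option Int × Option Int)),
    (∀ x : Int, x ∉ L → t'.get? x = t.get? x) →
    pvStackOK t L ta sb → pvStackOK t' L ta sb := by
  intro ta
  induction ta with
  | nil =>
    intro sb L t t' hagree h
    cases sb with
    | nil => trivial
    | cons q sb => exact h.elim
  | cons e ta ih =>
    intro sb L t t' hagree h
    cases sb with
    | nil => exact h.elim
    | cons q sb =>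
      obtain ⟨h1, h2, h3, h4, h5, h6, h7, h8⟩ := h
      refine ⟨h1, h2, h3, h4, h5, h6, ?_, ?_⟩
      · rw [hagree _ h2]; exact h7
      · refine ih sb _ t t' ?_ h8
        intro x hx
        refine hagree x ?_
        intro hmem
        exact hx ((pvInsert_mem L q.1 e.2.1 h3 h4 x).mpr (Or.inr hmem))

lemma pvChk_foldl_none (cmds : List String) : cmds.foldl pvChk none = none := by
  induction cmds with
  | nil => rfl
  | cons c cs ih => simpa [pvChk] using ih

lemma pvErase_not_mem (L : List Int) (hnd : L.Nodup) (p : Int) (h0 : 0 ≤ p)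
    (h1 : p < (L.length : Int)) :
    (L[p.toNat]'(by omega)) ∉ L.eraseIdx p.toNat := by
  intro hmem
  obtain ⟨j, hj, hjv⟩ := List.getElem_of_mem hmem
  have hj' : pvOptNth (L.eraseIdx p.toNat) (j : Int) = some (L[p.toNat]'(by omega)) := by
    rw [pvOptNth_natCast, List.getElem?_eq_getElem hj, hjv]
  rw [pvErase_optNth L p.toNat (j : Int) (by omega),
    show ((p.toNat : Nat) : Int) = p by omega] at hj'
  have hp' : pvOptNth L p = some (L[p.toNat]'(by omega)) := pvOptNth_some h0 h1
  have hlen := List.length_eraseIdx_of_lt (show p.toNat < L.length by omega)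
  split at hj'
  · next hlt => have := pvOptNth_inj hnd hj' hp'; omega
  · next hge => have := pvOptNth_inj hnd hj' hp'; omega

lemma pvMapFstRev (stack : List (Int × Int)) :
    (stack.map Prod.fst).reverse = stack.reverse.map Prod.fst := by
  simp [List.map_reverse]

lemma pvRange_optNth (n : Int) (j : Int) :
    pvOptNth (PySem.List.pyRange 0 n 1) j = if 0 ≤ j ∧ j < n then some j else none := by
  have hlen : (PySem.List.pyRange 0 n 1).length = n.toNat := by
    rw [PySem.List.length_pyRange_one]; congr 1; omega
  by_cases h : 0 ≤ j ∧ j < n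
  · rw [if_pos h, pvOptNth_some (by omega) (by omega)]
    rw [PySem.List.getElem_pyRange_one 0 n j.toNat (by omega)]
    congr 1; omega
  · rw [if_neg h]
    by_cases h0 : 0 ≤ j
    · exact pvOptNth_ge (by omega)
    · exact pvOptNth_neg (by omega)

lemma pvInitTbl_get? (n : Int) (j : Int) (h0 : 0 ≤ j) (h1 : j < n) :
    ((PySem.List.pyRange 0 n 1).foldl
      (fun t i => t.insert i (some (i - 1), some (i + 1))) PySem.Dict.empty).get? j =
      some (some (j - 1), some (j + 1)) := by
  rw [PySem.Dict.get?_eq_some_iff_mem_items _ _ _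
    (PySem.Dict.nodup_keys_foldl_insert _ _ _ (by simp [PySem.Dict.keys_empty]))]
  rw [PySem.Dict.items_foldl_insert_fresh (PySem.List.pyRange 0 n 1) (fun i => i)
    (fun i => (some (i - 1), some (i + 1))) PySem.Dict.empty
    (fun a _ => PySem.Dict.contains_empty a) (by simpa using PySem.List.nodup_pyRange_one 0 n)]
  simp only [show PySem.Dict.empty.items = ([] : List (Int × (Option Int × Option Int))) from rfl,
    List.nil_append, List.mem_map]
  exact ⟨j, (PySem.List.mem_pyRange_one).mpr ⟨h0, h1⟩, rfl⟩

lemma pvInitChain (n : Int) (hn : 2 ≤ n) :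
    pvChain ((((PySem.List.pyRange 0 n 1).foldl
        (fun t i => t.insert i (some (i - 1), some (i + 1)))
        PySem.Dict.empty).insert 0 (none, some 1)).insert (n - 1) (some (n - 2), none))
      (PySem.List.pyRange 0 n 1) := by
  intro i x hx
  rw [pvRange_optNth] at hx
  split at hx
  · next hb =>
    have hxi : x = i := (Option.some_inj.mp hx).symm
    subst hxi
    rw [pvRange_optNth, pvRange_optNth]
    by_cases hlast : x = n - 1
    · rw [hlast, PySem.Dict.get?_insert_self, if_pos (by omega), if_neg (by omega)]
      ring_nf
    · rw [PySem.Dict.get?_insert_of_ne _ _ hlast]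
      by_cases hfirst : x = 0
      · rw [hfirst, PySem.Dict.get?_insert_self, if_neg (by omega), if_pos (by omega)]
        norm_num
      · rw [PySem.Dict.get?_insert_of_ne _ _ hfirst,
          pvInitTbl_get? n x (by omega) (by omega), if_pos (by omega), if_pos (by omega)]
  · exact absurd hx (by simp)

lemma pvInitRlt (n : Int) :
    (PySem.List.pyRange 0 n 1).map (fun _ => "O") = List.replicate n.toNat "O" := by
  rw [List.map_const', PySem.List.length_pyRange_one]
  congr 1; omega

lemma pvMain : ∀ (cmds : List String) (sa : PvStA) (sb : PvStB),
    pvRel sa sb →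
    ((cmds.foldl pvChk
      (some ((sb.alive.length : Int), sb.pos, (sb.stack.map Prod.fst).reverse))).isSome = true) →
    pvRel (cmds.foldl pvStepA sa) (cmds.foldl pvStepB sb) := by
  intro cmds
  induction cmds with
  | nil => intro sa sb hrel _; exact hrel
  | cons c cs ih =>
    intro sa sb hrel hchk
    simp only [List.foldl_cons] at hchk ⊢
    cases hc1 : pvChk (some ((sb.alive.length : Int), sb.pos, (sb.stack.map Prod.fst).reverse)) c with
    | none =>
      rw [hc1, pvChk_foldl_none] at hchk
      exact absurd hchk (by simp)
    | some s1 =>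
      rw [hc1] at hchk
      obtain ⟨hrlt, hnd, hpm1, hple, hk, hch, hstk⟩ := hrel
      by_cases hC : c = "C"
      · -- delete the current row
        subst hC
        simp only [pvChk] at hc1
        rw [if_pos trivial] at hc1
        have hcond : 2 ≤ (sb.alive.length : Int) ∧ 0 ≤ sb.pos ∧
            sb.pos < (sb.alive.length : Int) := by
          by_contra hcon
          rw [if_neg hcon] at hc1
          cases hc1
        rw [if_pos hcond] at hc1
        have hp0 : 0 ≤ sb.pos := hcond.2.1
        have hp1 : sb.pos < (sb.alive.length : Int) := hcond.2.2
        have hs1 : s1 = ((sb.alive.length : Int) - 1,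
            if sb.pos = (sb.alive.length : Int) - 1 then sb.pos - 1 else sb.pos,
            sb.pos :: (sb.stack.map Prod.fst).reverse) := (Option.some_inj.mp hc1).symm
        have hget : pvOptNth sb.alive sb.pos = some (sb.alive[sb.pos.toNat]'(by omega)) :=
          pvOptNth_some hp0 hp1
        have hpop : PySem.List.pop? sb.alive sb.pos =
            some (sb.alive[sb.pos.toNat]'(by omega), sb.alive.eraseIdx sb.pos.toNat) := by
          have h := PySem.List.pop?_natCast sb.alive sb.pos.toNat (by omega)
          rw [show ((sb.pos.toNat : Nat) : Int) = sb.pos by omega] at h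
          exact h
        have hlenE : (sb.alive.eraseIdx sb.pos.toNat).length = sb.alive.length - 1 :=
          List.length_eraseIdx_of_lt (by omega)
        have hE := pvErase_optNth_all sb.alive sb.pos hp0
        have hkv2 : sa.k = some (sb.alive[sb.pos.toNat]'(by omega)) := by rw [hk, hget]
        have htv := hch sb.pos _ hget
        have hB : pvStepB sb "C" =
            { alive := sb.alive.eraseIdx sb.pos.toNat,
              pos := (if sb.pos = PySem.List.len (sb.alive.eraseIdx sb.pos.toNat) then sb.pos - 1 else sb.pos),
              result := PySem.List.pySetD sb.result (sb.alive[sb.pos.toNat]'(by omega)) "X",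
              stack := sb.stack ++ [(sb.pos, sb.alive[sb.pos.toNat]'(by omega))] } := by
          simp [pvStepB, hpop]
        have hA : pvStepA sa "C" =
            { table := pvDelTbl sa.table sb.alive sb.pos,
              rlt := PySem.List.pySetD sa.rlt (sb.alive[sb.pos.toNat]'(by omega)) "X",
              turn := sa.turn ++ [(pvOptNth sb.alive (sb.pos - 1), sb.alive[sb.pos.toNat]'(by omega), pvOptNth sb.alive (sb.pos + 1))],
              k := (if pvOptNth sb.alive (sb.pos + 1) = none then pvOptNth sb.alive (sb.pos - 1) else pvOptNth sb.alive (sb.pos + 1)) } := by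
          simp [pvStepA, hkv2, htv, pvDelTbl]
        have hne1 : pvOptNth sb.alive (sb.pos - 1) ≠ some (sb.alive[sb.pos.toNat]'(by omega)) := by
          intro hcc
          have := pvOptNth_inj hnd hcc hget
          omega
        have hne2 : pvOptNth sb.alive (sb.pos + 1) ≠ some (sb.alive[sb.pos.toNat]'(by omega)) := by
          intro hcc
          have := pvOptNth_inj hnd hcc hget
          omega
        rw [hA, hB]
        refine ih _ _ ⟨by rw [hrlt], ((sb.alive.eraseIdx_sublist sb.pos.toNat).nodup hnd),
          ?_, ?_, ?_, pvChainDel sa.table sb.alive sb.pos hnd hch hp0 hp1, ?_⟩ ?_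
        · show (-1 : Int) ≤ if sb.pos = PySem.List.len (sb.alive.eraseIdx sb.pos.toNat)
            then sb.pos - 1 else sb.pos
          simp only [PySem.List.len_eq, hlenE]
          split_ifs <;> omega
        · show (if sb.pos = PySem.List.len (sb.alive.eraseIdx sb.pos.toNat) then sb.pos - 1
            else sb.pos) ≤ ((sb.alive.eraseIdx sb.pos.toNat).length : Int)
          simp only [PySem.List.len_eq, hlenE]
          split_ifs with hc <;> omega
        · show (if pvOptNth sb.alive (sb.pos + 1) = none then pvOptNth sb.alive (sb.pos - 1)
            else pvOptNth sb.alive (sb.pos + 1)) =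
            pvOptNth (sb.alive.eraseIdx sb.pos.toNat)
              (if sb.pos = PySem.List.len (sb.alive.eraseIdx sb.pos.toNat) then sb.pos - 1
                else sb.pos)
          simp only [PySem.List.len_eq, hlenE]
          by_cases hpe : sb.pos = ((sb.alive.length - 1 : Nat) : Int)
          · rw [if_pos hpe]
            have hnone : pvOptNth sb.alive (sb.pos + 1) = none := pvOptNth_ge (by omega)
            rw [hnone, if_pos rfl, hE (sb.pos - 1), if_pos (by omega)]
          · rw [if_neg hpe]
            have hsome : pvOptNth sb.alive (sb.pos + 1) ≠ none := by
              rw [pvOptNth_some (by omega) (by omega)]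
              simp
            rw [if_neg hsome, hE sb.pos, if_neg (by omega)]
        · show pvStackOK (pvDelTbl sa.table sb.alive sb.pos) (sb.alive.eraseIdx sb.pos.toNat)
            ((sa.turn ++ [(pvOptNth sb.alive (sb.pos - 1), sb.alive[sb.pos.toNat]'(by omega),
              pvOptNth sb.alive (sb.pos + 1))]).reverse)
            ((sb.stack ++ [(sb.pos, sb.alive[sb.pos.toNat]'(by omega))]).reverse)
          simp only [List.reverse_append, List.reverse_cons, List.reverse_nil, List.nil_append,
            List.singleton_append]
          refine ⟨rfl, pvErase_not_mem sb.alive hnd sb.pos hp0 hp1, hp0, by rw [hlenE]; omega,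
            ?_, ?_, ?_, ?_⟩
          · rw [hE (sb.pos - 1), if_pos (by omega)]
          · rw [hE sb.pos, if_neg (by omega)]
          · rw [pvDelTbl_get?_other _ _ _ _ hne1 hne2]
            exact htv
          · have hcancel : PySem.List.insert (sb.alive.eraseIdx sb.pos.toNat) sb.pos
                (sb.alive[sb.pos.toNat]'(by omega)) = sb.alive := by
              have h := pvErase_cancel sb.alive sb.pos.toNat (by omega)
              rw [show ((sb.pos.toNat : Nat) : Int) = sb.pos by omega] at h
              exact h
            rw [hcancel]
            refine pvStackOK_congr _ _ _ _ _ ?_ hstk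
            intro x hx
            exact pvDelTbl_get?_other _ _ _ x (fun hcc => hx (pvOptNth_mem hcc))
              (fun hcc => hx (pvOptNth_mem hcc))
        · have htrip : (((sb.alive.eraseIdx sb.pos.toNat).length : Int),
              (if sb.pos = PySem.List.len (sb.alive.eraseIdx sb.pos.toNat) then sb.pos - 1
                else sb.pos),
              ((sb.stack ++ [(sb.pos, sb.alive[sb.pos.toNat]'(by omega))]).map
                Prod.fst).reverse) = s1 := by
            rw [hs1]
            refine Prod.ext ?_ (Prod.ext ?_ ?_)
            · show ((sb.alive.eraseIdx sb.pos.toNat).length : Int) = (sb.alive.length : Int) - 1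
              rw [hlenE]; omega
            · show (if sb.pos = PySem.List.len (sb.alive.eraseIdx sb.pos.toNat) then sb.pos - 1
                else sb.pos) = if sb.pos = (sb.alive.length : Int) - 1 then sb.pos - 1 else sb.pos
              simp only [PySem.List.len_eq, hlenE]
              split_ifs <;> omega
            · show ((sb.stack ++ [(sb.pos, sb.alive[sb.pos.toNat]'(by omega))]).map
                Prod.fst).reverse = sb.pos :: (sb.stack.map Prod.fst).reverse
              simp
          rw [← htrip] at hchk
          exact hchk
      · by_cases hZ : c = "Z"
        · -- restore the most recently deleted row
          subst hZ
          simp only [pvChk] at hc1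
          rw [if_neg (by decide), if_pos trivial] at hc1
          cases hrev : sb.stack.reverse with
          | nil =>
            simp only [pvMapFstRev, hrev, List.map_nil] at hc1
            cases hc1
          | cons qv rest =>
            simp only [pvMapFstRev, hrev, List.map_cons] at hc1
            have hs1 : s1 = ((sb.alive.length : Int) + 1,
                (if qv.1 ≤ sb.pos then sb.pos + 1 else sb.pos), rest.map Prod.fst) :=
              (Option.some_inj.mp hc1).symm
            have hstack : sb.stack = rest.reverse ++ [qv] := by
              rw [← List.reverse_reverse sb.stack, hrev, List.reverse_cons]
            cases hta : sa.turn.reverse with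
            | nil =>
              rw [hta, hrev] at hstk
              exact hstk.elim
            | cons e ta' =>
              rw [hta, hrev] at hstk
              obtain ⟨h1, h2, h3, h4, h5, h6, h7, h8⟩ := hstk
              have hturn : sa.turn = ta'.reverse ++ [e] := by
                rw [← List.reverse_reverse sa.turn, hta, List.reverse_cons]
              have hpopA : PySem.List.pop? sa.turn (-1) = some (e, ta'.reverse) := by
                rw [hturn]; exact PySem.List.pop?_last _ _
              have hpopB : PySem.List.pop? sb.stack (-1) = some (qv, rest.reverse) := by
                rw [hstack]; exact PySem.List.pop?_last _ _
              have hB : pvStepB sb "Z" =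
                  { alive := PySem.List.insert sb.alive qv.1 qv.2,
                    pos := (if qv.1 ≤ sb.pos then sb.pos + 1 else sb.pos),
                    result := PySem.List.pySetD sb.result qv.2 "O",
                    stack := rest.reverse } := by
                simp [pvStepB, hpopB]
              rw [← h1] at hB
              have hA : pvStepA sa "Z" =
                  { table := pvInsTbl sa.table sb.alive qv.1 e.2.1,
                    rlt := PySem.List.pySetD sa.rlt e.2.1 "O",
                    turn := ta'.reverse, k := sa.k } := by
                simp [pvStepA, hpopA, pvInsTbl, h5, h6]
              rw [h5, h6] at h7
              have hIns := pvInsert_optNth_all sb.alive qv.1 e.2.1 h3 h4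
              have hlen : (PySem.List.insert sb.alive qv.1 e.2.1).length = sb.alive.length + 1 :=
                pvInsert_length _ _ _ h3 h4
              have hagree : ∀ x : Int, x ∉ PySem.List.insert sb.alive qv.1 e.2.1 →
                  (pvInsTbl sa.table sb.alive qv.1 e.2.1).get? x = sa.table.get? x := by
                intro x hx
                refine pvInsTbl_get?_other _ _ _ _ x (fun hcc => ?_) (fun hcc => ?_) <;>
                  exact hx ((pvInsert_mem sb.alive qv.1 e.2.1 h3 h4 x).mpr
                    (Or.inr (pvOptNth_mem hcc)))
              rw [hA, hB]
              refine ih _ _ ⟨by rw [hrlt], pvInsert_nodup _ _ _ h3 h4 hnd h2, ?_, ?_, ?_,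
                pvChainIns sa.table sb.alive qv.1 e.2.1 hnd hch h3 h4 h2 h7, ?_⟩ ?_
              · show (-1 : Int) ≤ if qv.1 ≤ sb.pos then sb.pos + 1 else sb.pos
                split_ifs <;> omega
              · show (if qv.1 ≤ sb.pos then sb.pos + 1 else sb.pos) ≤
                  ((PySem.List.insert sb.alive qv.1 e.2.1).length : Int)
                rw [hlen]
                split_ifs <;> push_cast <;> omega
              · show sa.k = pvOptNth (PySem.List.insert sb.alive qv.1 e.2.1)
                  (if qv.1 ≤ sb.pos then sb.pos + 1 else sb.pos)
                rw [hk]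
                by_cases hqp : qv.1 ≤ sb.pos
                · rw [if_pos hqp, hIns (sb.pos + 1), if_neg (by omega), if_neg (by omega)]
                  ring_nf
                · rw [if_neg hqp, hIns sb.pos, if_pos (by omega)]
              · show pvStackOK (pvInsTbl sa.table sb.alive qv.1 e.2.1)
                  (PySem.List.insert sb.alive qv.1 e.2.1) ta'.reverse.reverse
                  rest.reverse.reverse
                simp only [List.reverse_reverse]
                exact pvStackOK_congr _ _ _ _ _ hagree h8
              · have htrip : (((PySem.List.insert sb.alive qv.1 e.2.1).length : Int),
                    (if qv.1 ≤ sb.pos then sb.pos + 1 else sb.pos),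
                    ((rest.reverse).map Prod.fst).reverse) = s1 := by
                  rw [hs1]
                  refine Prod.ext ?_ (Prod.ext rfl ?_)
                  · show ((PySem.List.insert sb.alive qv.1 e.2.1).length : Int) =
                      (sb.alive.length : Int) + 1
                    rw [hlen]; push_cast; ring
                  · show ((rest.reverse).map Prod.fst).reverse = rest.map Prod.fst
                    simp
                rw [← htrip] at hchk
                exact hchk
        · -- move / no-op commands
          cases hsp : PySem.Str.split₀ c with
          | nil => simp only [pvChk, if_neg hC, if_neg hZ, hsp] at hc1; cases hc1
          | cons w1 rest =>
            cases rest with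
            | nil => simp only [pvChk, if_neg hC, if_neg hZ, hsp] at hc1; cases hc1
            | cons w2 rest2 =>
              cases rest2 with
              | cons w3 rest3 => simp only [pvChk, if_neg hC, if_neg hZ, hsp] at hc1; cases hc1
              | nil =>
                simp only [pvChk, if_neg hC, if_neg hZ, hsp] at hc1
                by_cases hU : w1 = "U"
                · rw [if_pos hU] at hc1
                  cases hod : PySem.Int.ofStr? w2 with
                  | none => simp only [hod] at hc1; cases hc1
                  | some d =>
                    simp only [hod] at hc1
                    by_cases hdle : d ≤ 0
                    · rw [if_pos hdle] at hc1
                      have hs1 : s1 = ((sb.alive.length : Int), sb.pos,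
                          (sb.stack.map Prod.fst).reverse) := (Option.some_inj.mp hc1).symm
                      have hB : pvStepB sb c = sb := by
                        simp [pvStepB, if_neg hC, if_neg hZ, hsp, hod,
                          if_neg (by omega : ¬ (0:Int) < d)]
                      have hA : pvStepA sa c = sa := by
                        simp [pvStepA, if_neg hC, if_neg hZ, hsp, hod,
                          PySem.List.pyRange_one_eq_nil (by omega : d ≤ 0)]
                      rw [hA, hB]
                      refine ih _ _ ⟨hrlt, hnd, hpm1, hple, hk, hch, hstk⟩ ?_
                      simpa [hs1] using hchk
                    · rw [if_neg hdle] at hc1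
                      have hcond : 0 ≤ sb.pos ∧ sb.pos < (sb.alive.length : Int) ∧
                          -1 ≤ sb.pos - d := by
                        by_contra hcon
                        rw [if_neg hcon] at hc1
                        cases hc1
                      rw [if_pos hcond] at hc1
                      have hs1 : s1 = ((sb.alive.length : Int), sb.pos - d,
                          (sb.stack.map Prod.fst).reverse) := (Option.some_inj.mp hc1).symm
                      have hB : pvStepB sb c = { sb with pos := sb.pos - d } := by
                        simp [pvStepB, if_neg hC, if_neg hZ, hsp, if_pos hU, hod,
                          if_pos (by omega : (0:Int) < d)]
                      have hA : pvStepA sa c = { sa with k := pvOptNth sb.alive (sb.pos - d) } := by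
                        simp only [pvStepA, if_neg hC, if_neg hZ, hsp, if_pos hU, hod]
                        congr 1
                        rw [pvFoldlConst, PySem.List.length_pyRange_one,
                          show (d - 0).toNat = d.toNat by omega, hk]
                        rw [pvWalkUp sa.table sb.alive hch d.toNat sb.pos (by omega) hcond.2.1]
                        congr 1
                        omega
                      rw [hA, hB]
                      refine ih _ _ ⟨hrlt, hnd, by show (-1:Int) ≤ sb.pos - d; omega,
                        by show sb.pos - d ≤ ((sb.alive.length : Int)); omega,
                        rfl, hch, hstk⟩ ?_
                      simpa [hs1] using hchk
                · by_cases hD : w1 = "D"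
                  · rw [if_neg hU, if_pos hD] at hc1
                    cases hod : PySem.Int.ofStr? w2 with
                    | none => simp only [hod] at hc1; cases hc1
                    | some d =>
                      simp only [hod] at hc1
                      by_cases hdle : d ≤ 0
                      · rw [if_pos hdle] at hc1
                        have hs1 : s1 = ((sb.alive.length : Int), sb.pos,
                            (sb.stack.map Prod.fst).reverse) := (Option.some_inj.mp hc1).symm
                        have hB : pvStepB sb c = sb := by
                          simp [pvStepB, if_neg hC, if_neg hZ, hsp, hod,
                            if_neg (by omega : ¬ (0:Int) < d)]
                        have hA : pvStepA sa c = sa := by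
                          simp [pvStepA, if_neg hC, if_neg hZ, hsp, hod,
                            PySem.List.pyRange_one_eq_nil (by omega : d ≤ 0)]
                        rw [hA, hB]
                        refine ih _ _ ⟨hrlt, hnd, hpm1, hple, hk, hch, hstk⟩ ?_
                        simpa [hs1] using hchk
                      · rw [if_neg hdle] at hc1
                        have hcond : 0 ≤ sb.pos ∧ sb.pos < (sb.alive.length : Int) ∧
                            sb.pos + d ≤ (sb.alive.length : Int) := by
                          by_contra hcon
                          rw [if_neg hcon] at hc1
                          cases hc1
                        rw [if_pos hcond] at hc1
                        have hs1 : s1 = ((sb.alive.length : Int), sb.pos + d,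
                            (sb.stack.map Prod.fst).reverse) := (Option.some_inj.mp hc1).symm
                        have hB : pvStepB sb c = { sb with pos := sb.pos + d } := by
                          simp [pvStepB, if_neg hC, if_neg hZ, hsp, if_neg hU, if_pos hD, hod,
                            if_pos (by omega : (0:Int) < d)]
                        have hA : pvStepA sa c = { sa with k := pvOptNth sb.alive (sb.pos + d) } := by
                          simp only [pvStepA, if_neg hC, if_neg hZ, hsp, if_neg hU, if_pos hD, hod]
                          congr 1
                          rw [pvFoldlConst, PySem.List.length_pyRange_one,
                            show (d - 0).toNat = d.toNat by omega, hk]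
                          rw [pvWalkDown sa.table sb.alive hch d.toNat sb.pos hcond.1 (by omega)]
                          congr 1
                          omega
                        rw [hA, hB]
                        refine ih _ _ ⟨hrlt, hnd, by show (-1:Int) ≤ sb.pos + d; omega,
                          by show sb.pos + d ≤ ((sb.alive.length : Int)); omega,
                          rfl, hch, hstk⟩ ?_
                        simpa [hs1] using hchk
                  · rw [if_neg hU, if_neg hD] at hc1
                    have hs1 : s1 = ((sb.alive.length : Int), sb.pos,
                        (sb.stack.map Prod.fst).reverse) := (Option.some_inj.mp hc1).symm
                    have hB : pvStepB sb c = sb := by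
                      simp only [pvStepB, if_neg hC, if_neg hZ, hsp, if_neg hU, if_neg hD]
                    have hA : pvStepA sa c = sa := by
                      simp only [pvStepA, if_neg hC, if_neg hZ, hsp, if_neg hU, if_neg hD]
                    rw [hA, hB]
                    refine ih _ _ ⟨hrlt, hnd, hpm1, hple, hk, hch, hstk⟩ ?_
                    simpa [hs1] using hchk

-- for n = 1 A's init overwrites row 0's pointers, so the chain invariant does not hold;
-- but from count 1 the checker admits only move/no-op commands, which touch neither mask
lemma pvOne : ∀ (cmds : List String) (p : Int) (sa : PvStA) (sb : PvStB),
    ((cmds.foldl pvChk (some (1, p, []))).isSome = true) →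
    (cmds.foldl pvStepA sa).rlt = sa.rlt ∧ (cmds.foldl pvStepB sb).result = sb.result := by
  intro cmds
  induction cmds with
  | nil => intro p sa sb _; exact ⟨rfl, rfl⟩
  | cons c cs ih =>
    intro p sa sb hchk
    simp only [List.foldl_cons] at hchk ⊢
    by_cases hC : c = "C"
    · exfalso
      subst hC
      simp only [pvChk] at hchk
      rw [if_pos trivial, if_neg (by omega), pvChk_foldl_none] at hchk
      exact absurd hchk (by simp)
    · by_cases hZ : c = "Z"
      · exfalso
        subst hZ
        simp only [pvChk] at hchk
        rw [if_neg (by decide), if_pos trivial] at hchk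
        rw [pvChk_foldl_none] at hchk
        exact absurd hchk (by simp)
      · cases hsp : PySem.Str.split₀ c with
        | nil =>
          exfalso
          simp only [pvChk, if_neg hC, if_neg hZ, hsp, pvChk_foldl_none] at hchk
          exact absurd hchk (by simp)
        | cons w1 rest =>
          cases rest with
          | nil =>
            exfalso
            simp only [pvChk, if_neg hC, if_neg hZ, hsp, pvChk_foldl_none] at hchk
            exact absurd hchk (by simp)
          | cons w2 rest2 =>
            cases rest2 with
            | cons w3 rest3 =>
              exfalso
              simp only [pvChk, if_neg hC, if_neg hZ, hsp, pvChk_foldl_none] at hchk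
              exact absurd hchk (by simp)
            | nil =>
              simp only [pvChk, if_neg hC, if_neg hZ, hsp] at hchk
              have hnext : ∀ (p' : Int),
                  ((cs.foldl pvChk (some (1, p', []))).isSome = true) →
                  (pvStepA sa c).rlt = sa.rlt → (pvStepB sb c).result = sb.result →
                  ((cs.foldl pvStepA (pvStepA sa c)).rlt = sa.rlt ∧
                   (cs.foldl pvStepB (pvStepB sb c)).result = sb.result) := by
                intro p' h hra hrb
                obtain ⟨ha, hb⟩ := ih p' (pvStepA sa c) (pvStepB sb c) h
                exact ⟨by rw [ha, hra], by rw [hb, hrb]⟩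
              by_cases hU : w1 = "U"
              · rw [if_pos hU] at hchk
                cases hod : PySem.Int.ofStr? w2 with
                | none =>
                  rw [hod, pvChk_foldl_none] at hchk
                  exact absurd hchk (by simp)
                | some d =>
                  simp only [hod] at hchk
                  have hra : (pvStepA sa c).rlt = sa.rlt := by
                    simp [pvStepA, if_neg hC, if_neg hZ, hsp, if_pos hU, hod]
                  have hrb : (pvStepB sb c).result = sb.result := by
                    simp only [pvStepB, if_neg hC, if_neg hZ, hsp, if_pos hU, hod]
                    split <;> rfl
                  by_cases hdle : d ≤ 0
                  · rw [if_pos hdle] at hchk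
                    exact hnext p hchk hra hrb
                  · rw [if_neg hdle] at hchk
                    by_cases hcond : 0 ≤ p ∧ p < 1 ∧ -1 ≤ p - d
                    · rw [if_pos hcond] at hchk
                      exact hnext (p - d) hchk hra hrb
                    · rw [if_neg hcond, pvChk_foldl_none] at hchk
                      exact absurd hchk (by simp)
              · by_cases hD : w1 = "D"
                · rw [if_neg hU, if_pos hD] at hchk
                  cases hod : PySem.Int.ofStr? w2 with
                  | none =>
                    rw [hod, pvChk_foldl_none] at hchk
                    exact absurd hchk (by simp)
                  | some d =>
                    simp only [hod] at hchk
                    have hra : (pvStepA sa c).rlt = sa.rlt := by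
                      simp [pvStepA, if_neg hC, if_neg hZ, hsp, if_neg hU, if_pos hD, hod]
                    have hrb : (pvStepB sb c).result = sb.result := by
                      simp only [pvStepB, if_neg hC, if_neg hZ, hsp, if_neg hU, if_pos hD, hod]
                      split <;> rfl
                    by_cases hdle : d ≤ 0
                    · rw [if_pos hdle] at hchk
                      exact hnext p hchk hra hrb
                    · rw [if_neg hdle] at hchk
                      by_cases hcond : 0 ≤ p ∧ p < 1 ∧ p + d ≤ 1
                      · rw [if_pos hcond] at hchk
                        exact hnext (p + d) hchk hra hrb
                      · rw [if_neg hcond, pvChk_foldl_none] at hchk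
                        exact absurd hchk (by simp)
                · rw [if_neg hU, if_neg hD] at hchk
                  have hra : (pvStepA sa c).rlt = sa.rlt := by
                    simp only [pvStepA, if_neg hC, if_neg hZ, hsp, if_neg hU, if_neg hD]
                  have hrb : (pvStepB sb c).result = sb.result := by
                    simp only [pvStepB, if_neg hC, if_neg hZ, hsp, if_neg hU, if_neg hD]
                  exact hnext p hchk hra hrb

lemma pvNoopFoldA (cmds : List String) : ∀ (sa : PvStA), cmds.all pvNoopChk = true →
    cmds.foldl pvStepA sa = sa := by
  induction cmds with
  | nil => intro sa _; rfl
  | cons c cs ih =>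
    intro sa h
    rw [List.all_cons, Bool.and_eq_true] at h
    obtain ⟨hc, hcs⟩ := h
    rw [List.foldl_cons]
    by_cases hC : c = "C"
    · rw [pvNoopChk, if_pos hC] at hc; cases hc
    · by_cases hZ : c = "Z"
      · rw [pvNoopChk, if_neg hC, if_pos hZ] at hc; cases hc
      · cases hsp : PySem.Str.split₀ c with
        | nil => simp only [pvNoopChk, if_neg hC, if_neg hZ, hsp] at hc; cases hc
        | cons w1 rest =>
          cases rest with
          | nil => simp only [pvNoopChk, if_neg hC, if_neg hZ, hsp] at hc; cases hc
          | cons w2 rest2 =>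
            cases rest2 with
            | cons w3 rest3 => simp only [pvNoopChk, if_neg hC, if_neg hZ, hsp] at hc; cases hc
            | nil =>
              by_cases hUD : w1 = "U" ∨ w1 = "D"
              · simp only [pvNoopChk, if_neg hC, if_neg hZ, hsp, if_pos hUD] at hc
                cases hod : PySem.Int.ofStr? w2 with
                | none => rw [hod] at hc; cases hc
                | some d =>
                  rw [hod] at hc
                  have hd : d ≤ 0 := by simpa using hc
                  have hnil := PySem.List.pyRange_one_eq_nil (a := 0) (b := d) (by omega)
                  have hA : pvStepA sa c = sa := by
                    rcases hUD with hU | hD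
                    · simp [pvStepA, if_neg hC, if_neg hZ, hsp, hod, hnil]
                    · simp [pvStepA, if_neg hC, if_neg hZ, hsp, hD, hod, hnil]
                  rw [hA]
                  exact ih sa hcs
              · have hA : pvStepA sa c = sa := by
                  simp only [not_or] at hUD
                  simp [pvStepA, if_neg hC, if_neg hZ, hsp, if_neg hUD.1, if_neg hUD.2]
                rw [hA]
                exact ih sa hcs

lemma pvNoopFoldB (cmds : List String) : ∀ (sb : PvStB), cmds.all pvNoopChk = true →
    cmds.foldl pvStepB sb = sb := by
  induction cmds with
  | nil => intro sb _; rfl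
  | cons c cs ih =>
    intro sb h
    rw [List.all_cons, Bool.and_eq_true] at h
    obtain ⟨hc, hcs⟩ := h
    rw [List.foldl_cons]
    by_cases hC : c = "C"
    · rw [pvNoopChk, if_pos hC] at hc; cases hc
    · by_cases hZ : c = "Z"
      · rw [pvNoopChk, if_neg hC, if_pos hZ] at hc; cases hc
      · cases hsp : PySem.Str.split₀ c with
        | nil => simp only [pvNoopChk, if_neg hC, if_neg hZ, hsp] at hc; cases hc
        | cons w1 rest =>
          cases rest with
          | nil => simp only [pvNoopChk, if_neg hC, if_neg hZ, hsp] at hc; cases hc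
          | cons w2 rest2 =>
            cases rest2 with
            | cons w3 rest3 => simp only [pvNoopChk, if_neg hC, if_neg hZ, hsp] at hc; cases hc
            | nil =>
              by_cases hUD : w1 = "U" ∨ w1 = "D"
              · simp only [pvNoopChk, if_neg hC, if_neg hZ, hsp, if_pos hUD] at hc
                cases hod : PySem.Int.ofStr? w2 with
                | none => rw [hod] at hc; cases hc
                | some d =>
                  rw [hod] at hc
                  have hd : d ≤ 0 := by simpa using hc
                  have hB : pvStepB sb c = sb := by
                    rcases hUD with hU | hD
                    · simp [pvStepB, if_neg hC, if_neg hZ, hsp, hU, hod,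
                        if_neg (by omega : ¬ (0:Int) < d)]
                    · simp [pvStepB, if_neg hC, if_neg hZ, hsp, hD, hod,
                        if_neg (by omega : ¬ (0:Int) < d)]
                  rw [hB]
                  exact ih sb hcs
              · have hB : pvStepB sb c = sb := by
                  simp only [not_or] at hUD
                  simp [pvStepB, if_neg hC, if_neg hZ, hsp, if_neg hUD.1, if_neg hUD.2]
                rw [hB]
                exact ih sb hcs

-- ===== VERDICT (by name: the statement is the Claim_ definition above) =====
theorem solution_spec : Claim_equal_solution := by
  unfold Claim_equal_solution
  intro n k cmd _hdom hpre
  show Spec_solution n k cmd (solution n k cmd)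
  unfold Spec_solution
  simp only [solution, solution_alt]
  rcases hpre with hnoop | ⟨hn, hk0, hk1, hchk⟩
  · rw [pvNoopFoldA cmd _ hnoop]
    show PySem.Str.join "" ((PySem.List.pyRange 0 n 1).map (fun _ => "O")) = _
    rw [pvNoopFoldB cmd _ hnoop]
    exact congrArg (PySem.Str.join "") (pvInitRlt n)
  by_cases hone : n = 1
  · subst hone
    have hk : k = 0 := by omega
    subst hk
    have h2 : ∀ (sa : PvStA) (sb : PvStB), sa.rlt = sb.result →
        (cmd.foldl pvStepA sa).rlt = (cmd.foldl pvStepB sb).result := by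
      intro sa sb hh
      obtain ⟨ha, hb⟩ := pvOne cmd 0 sa sb hchk
      rw [ha, hb, hh]
    exact congrArg (PySem.Str.join "") (h2 _ _ (pvInitRlt 1))
  · have hn2 : 2 ≤ n := by omega
    have hlen : ((PySem.List.pyRange 0 n 1).length : Int) = n := by
      rw [PySem.List.length_pyRange_one]; omega
    have hrel : pvRel
        { table := ((((PySem.List.pyRange 0 n 1).foldl
            (fun t i => t.insert i (some (i - 1), some (i + 1)))
            PySem.Dict.empty).insert 0 (none, some 1)).insert (n - 1) (some (n - 2), none)),
          rlt := (PySem.List.pyRange 0 n 1).map (fun _ => "O"), turn := [], k := some k }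
        { alive := PySem.List.pyRange 0 n 1, pos := k,
          result := List.replicate n.toNat "O", stack := [] } := by
      refine ⟨pvInitRlt n, PySem.List.nodup_pyRange_one 0 n, ?_, ?_, ?_,
        pvInitChain n hn2, trivial⟩
      · show (-1 : Int) ≤ k
        omega
      · show k ≤ ((PySem.List.pyRange 0 n 1).length : Int)
        rw [hlen]; omega
      · show some k = pvOptNth (PySem.List.pyRange 0 n 1) k
        rw [pvRange_optNth, if_pos ⟨hk0, hk1⟩]
    have hchk' : ((cmd.foldl pvChk
        (some (((PySem.List.pyRange 0 n 1).length : Int), k,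
          (([] : List (Int × Int)).map Prod.fst).reverse))).isSome = true) := by
      have htrip : ((((PySem.List.pyRange 0 n 1).length : Int), k,
          (([] : List (Int × Int)).map Prod.fst).reverse) : Int × Int × List Int) =
          (n, k, ([] : List Int)) := by
        rw [hlen]; rfl
      rw [htrip]
      exact hchk
    exact congrArg (PySem.Str.join "") (pvMain cmd _ _ hrel hchk').1
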